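-- pv_equiv track=rewrite | github.com/Kennedh/CodeWars | List of all rationals - going further.py | rat_at
-- ===== SOURCE A (Python) =====
-- def rat_at(n):
--     k = n + 1
--     b = bin(k)[2:]
--     path = b[1:]
--     (a, b) = (1, 1)
--     for c in str(path):
--         if c == "0":
--             (a, b) = (a, a + b)
--         elif c == "1":
--             (a, b) = (a + b, b)
--     return (a, b)
-- ===== SOURCE B (Python) =====
-- def rat_at(n):
--     # LSB-first 2x2 matrix-product walk instead of A's MSB-first string walk.
--     k = n + 1
--     p00, p01, p10, p11 = 1, 0, 0, 1
--     while k > 1: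
--         k, bit = divmod(k, 2)
--         if bit:
--             p10, p11 = p00 + p10, p01 + p11
--         else:
--             p00, p01 = p00 + p10, p01 + p11
--     return (p00 + p10, p01 + p11)
-- ===== Notes on version B (the rewrite author's own statement) =====
-- stated objective: alternative
-- what changed: Replaces A's build-binary-string-then-walk-bits-MSB-first Stern-Brocot descent with a direct LSB-first arithmetic loop (divmod) that accumulates a 2x2 matrix product and applies it to (1,1) at the end; no string is built.
-- outside the precondition, e.g. on rat_at(-2): A returns (2, 1), B returns (1, 1)
import Mathlib
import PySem

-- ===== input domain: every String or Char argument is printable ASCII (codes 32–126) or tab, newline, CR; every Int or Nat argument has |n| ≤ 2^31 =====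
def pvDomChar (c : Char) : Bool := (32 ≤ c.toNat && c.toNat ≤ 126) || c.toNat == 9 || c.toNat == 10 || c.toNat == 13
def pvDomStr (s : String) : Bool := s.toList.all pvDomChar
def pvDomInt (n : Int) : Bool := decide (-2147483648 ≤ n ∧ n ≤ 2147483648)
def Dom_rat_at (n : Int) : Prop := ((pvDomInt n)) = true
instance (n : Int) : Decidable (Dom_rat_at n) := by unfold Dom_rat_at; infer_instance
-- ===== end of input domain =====

-- B computes the same Calkin–Wilf pair by an LSB-first divmod loop accumulating a 2×2
-- matrix product, instead of A's MSB-first walk over the binary string ("alternative").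

-- ===== PORT A =====
-- hand port of the digit part of Python's bin(): binary digits of m, MSB first (exact for all m)
def pvBinDigits (m : Nat) : List Char :=
  if m < 2 then [if m = 0 then '0' else '1']
  else pvBinDigits (m / 2) ++ [if m % 2 = 0 then '0' else '1']

-- hand port of bin(k) as a List Char ("-0b…" for k < 0, "0b…" otherwise; exact)
def pvBin (k : Int) : List Char :=
  if k < 0 then '-' :: '0' :: 'b' :: pvBinDigits (-k).toNat
  else '0' :: 'b' :: pvBinDigits k.toNat

def rat_at (n : Int) : Int × Int :=
  let k := n + 1
  let b := PySem.List.slice (pvBin k) (some 2) none      -- bin(k)[2:]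
  let path := PySem.List.slice b (some 1) none           -- b[1:]
  path.foldl
    (fun (ab : Int × Int) c =>
      if c = '0' then (ab.1, ab.1 + ab.2)
      else if c = '1' then (ab.1 + ab.2, ab.2)
      else ab)
    (1, 1)

-- ===== PORT B =====
-- the while-loop of Source B; `k, bit = divmod(k, 2)` ported as floordiv/mod (divisor 2 ≠ 0, exact)
def ratLoop (k p00 p01 p10 p11 : Int) : Int × Int × Int × Int :=
  if h : k > 1 then
    if PySem.Int.mod k 2 ≠ 0 then
      ratLoop (PySem.Int.floordiv k 2) p00 p01 (p00 + p10) (p01 + p11)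
    else
      ratLoop (PySem.Int.floordiv k 2) (p00 + p10) (p01 + p11) p10 p11
  else (p00, p01, p10, p11)
termination_by k.toNat
decreasing_by
  all_goals
    have hd : PySem.Int.floordiv k 2 = k / 2 := PySem.Int.floordiv_eq_ediv_of_pos (by omega)
    omega

def rat_at_alt (n : Int) : Int × Int :=
  let k := n + 1
  match ratLoop k 1 0 0 1 with
  | (p00, p01, p10, p11) => (p00 + p10, p01 + p11)

-- ===== PRECONDITION & SPEC =====
-- Pre_ excludes n ≤ -2: there A slices bin() of a negative number and folds over the leftover
-- "b1…" characters, an accident of the implementation; B's loop naturally returns (1, 1) there.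
def Pre_rat_at (n : Int) : Prop := -1 ≤ n
instance (n : Int) : Decidable (Pre_rat_at n) := by unfold Pre_rat_at; infer_instance
def pvWitness_rat_at : Int := 5

def Spec_rat_at (n : Int) (out : Int × Int) : Prop := out = rat_at_alt n
instance (n : Int) (out : Int × Int) : Decidable (Spec_rat_at n out) := by unfold Spec_rat_at; infer_instance

-- ===== CLAIM (what is proved, stated in full; the proofs are below) =====
def Claim_equal_rat_at : Prop := ∀ (n : Int), Dom_rat_at n → Pre_rat_at n → Spec_rat_at n (rat_at n)

-- ===== LEMMAS AND PROOFS =====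

-- common characterisation: the Calkin–Wilf pair at 1-based index m
def cw (m : Nat) : Int × Int :=
  if m ≤ 1 then (1, 1)
  else
    let ab := cw (m / 2)
    if m % 2 = 0 then (ab.1, ab.1 + ab.2) else (ab.1 + ab.2, ab.2)

def pvStep : Int × Int → Char → Int × Int :=
  fun ab c =>
    if c = '0' then (ab.1, ab.1 + ab.2)
    else if c = '1' then (ab.1 + ab.2, ab.2)
    else ab

lemma pvBinDigits_ne_nil (m : Nat) : pvBinDigits m ≠ [] := by
  unfold pvBinDigits
  split <;> simp

lemma A_side (m : Nat) (hm : 1 ≤ m) :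
    (pvBinDigits m).tail.foldl pvStep (1, 1) = cw m := by
  induction m using Nat.strong_induction_on with
  | _ m ih =>
    by_cases h2 : m < 2
    · interval_cases m
      simp [pvBinDigits, cw]
    · have hhalf : 1 ≤ m / 2 := by omega
      rw [pvBinDigits, if_neg (by omega)]
      obtain ⟨x, xs, hx⟩ := List.exists_cons_of_ne_nil (pvBinDigits_ne_nil (m / 2))
      have ihh := ih (m / 2) (by omega) hhalf
      rw [hx] at ihh
      simp only [List.tail_cons] at ihh
      rw [hx]
      conv_rhs => rw [cw]
      rw [if_neg (by omega : ¬ m ≤ 1)]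
      rcases Nat.even_or_odd m with he | ho
      · have hme : m % 2 = 0 := Nat.even_iff.mp he
        simp [hme, List.foldl_append, ihh, pvStep]
      · have hmo : m % 2 = 1 := Nat.odd_iff.mp ho
        simp [hmo, List.foldl_append, ihh, pvStep]

lemma B_side (m : Nat) (hm : 1 ≤ m) (p00 p01 p10 p11 : Int) :
    ((ratLoop (m : Int) p00 p01 p10 p11).1 + (ratLoop (m : Int) p00 p01 p10 p11).2.2.1,
     (ratLoop (m : Int) p00 p01 p10 p11).2.1 + (ratLoop (m : Int) p00 p01 p10 p11).2.2.2)
      = ((cw m).1 * p00 + (cw m).2 * p10, (cw m).1 * p01 + (cw m).2 * p11) := by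
  induction m using Nat.strong_induction_on generalizing p00 p01 p10 p11 with
  | _ m ih =>
    have hdiv : PySem.Int.floordiv ((m : Nat) : Int) 2 = ((m / 2 : Nat) : Int) := by
      exact_mod_cast PySem.Int.floordiv_natCast m 2
    have hmod : PySem.Int.mod ((m : Nat) : Int) 2 = ((m % 2 : Nat) : Int) := by
      exact_mod_cast PySem.Int.mod_natCast m 2
    by_cases h2 : m < 2
    · interval_cases m
      rw [ratLoop, dif_neg (by norm_num)]
      conv_rhs => rw [cw]
      simp
    · have hhalf : 1 ≤ m / 2 := by omega
      rw [ratLoop, dif_pos (by exact_mod_cast (by omega : (1 : Int) < (m : Int)))]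
      rw [hmod, hdiv]
      conv_rhs => rw [cw]
      rw [if_neg (by omega : ¬ m ≤ 1)]
      rcases Nat.even_or_odd m with he | ho
      · have hme : m % 2 = 0 := Nat.even_iff.mp he
        rw [if_neg (show ¬ (((m % 2 : Nat) : Int) ≠ 0) by simp [hme])]
        rw [ih (m / 2) (by omega) hhalf]
        rw [if_pos hme]
        simp only [Prod.mk.injEq]
        constructor <;> ring
      · have hmo : m % 2 = 1 := Nat.odd_iff.mp ho
        rw [if_pos (show (((m % 2 : Nat) : Int) ≠ 0) by simp [hmo])]
        rw [ih (m / 2) (by omega) hhalf]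
        rw [if_neg (by omega : ¬ m % 2 = 0)]
        simp only [Prod.mk.injEq]
        constructor <;> ring

lemma alt_eq_cw (m : Nat) (hm : 1 ≤ m) : rat_at_alt ((m : Int) - 1) = cw m := by
  unfold rat_at_alt
  have hk : (m : Int) - 1 + 1 = (m : Int) := by ring
  simp only [hk]
  have hb := B_side m hm 1 0 0 1
  rcases hr : ratLoop (m : Int) 1 0 0 1 with ⟨a, b, c, d⟩
  rw [hr] at hb
  simp only [mul_one, mul_zero, zero_add, add_zero] at hb
  exact hb

lemma A_eq_cw (m : Nat) (hm : 1 ≤ m) : rat_at ((m : Int) - 1) = cw m := by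
  unfold rat_at
  have hk : (m : Int) - 1 + 1 = (m : Int) := by ring
  simp only [hk]
  rw [pvBin, if_neg (by exact_mod_cast (by omega : ¬ (m : Int) < 0))]
  have h2 : PySem.List.slice ('0' :: 'b' :: pvBinDigits ((m : Int)).toNat) (some 2) none
      = pvBinDigits ((m : Int)).toNat := by simp [pysem]
  rw [h2, PySem.List.slice_from_one]
  have hto : ((m : Int)).toNat = m := by omega
  rw [hto]
  exact A_side m hm

-- ===== VERDICT (by name: the statement is the Claim_ definition above) =====
theorem rat_at_spec : Claim_equal_rat_at := by
  intro n _ hpre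
  unfold Spec_rat_at
  have hpre' : (-1 : Int) ≤ n := hpre
  by_cases hn : n = -1
  · subst hn
    -- k = 0 on both sides: A's path is empty, B's loop does not run
    unfold rat_at rat_at_alt
    norm_num
    rw [pvBin, if_neg (by norm_num), pvBinDigits]
    simp only [Int.toNat_zero]
    norm_num
    rw [ratLoop, dif_neg (by norm_num)]
    have h2 : PySem.List.slice ['0', 'b', '0'] (some 2) none = ['0'] := by simp [pysem]
    rw [h2, PySem.List.slice_from_one]
    simp
  · have h1 : (1 : Int) ≤ n + 1 := by omega
    set m := (n + 1).toNat with hmdef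
    have hm : (m : Int) = n + 1 := Int.toNat_of_nonneg (by omega)
    have hm1 : 1 ≤ m := by omega
    have hmn : n = (m : Int) - 1 := by omega
    rw [hmn, A_eq_cw m hm1, alt_eq_cw m hm1]
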